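-- pv_equiv track=rewrite | github.com/nicveggio01/its-python_new | RecuperoePotenz5/Matriciquadrate.py | caricoMin
-- ===== SOURCE A (Python) =====
-- def caricoMin(matrice: list[list[int]]) -> tuple[int, int]:
--
--     if not matrice or not matrice[0]:
--         raise ValueError("La matrice non può essere vuota")
--
--     numero_righe= len(matrice)
--     numero_colonne= len(matrice[0])
--
--     somma_righe= [sum(riga) for riga in matrice]
--     somme_colonne = [sum(matrice[i][c] for i in range(numero_righe)) for c in range(numero_colonne)]
--
--     carico_min=0
--
--     for r in range(numero_righe):
--         for c in range(numero_colonne):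
--             carico= somma_righe[r] - somme_colonne[c]
--             if carico < carico_min:
--                 carico_min= carico
--
--     return carico_min
-- ===== SOURCE B (Python) =====
-- def caricoMin(matrice: list[list[int]]) -> int:
--     if not matrice or not matrice[0]:
--         raise ValueError("La matrice non può essere vuota")
--     min_riga = min(sum(riga) for riga in matrice)
--     max_colonna = max(sum(riga[c] for riga in matrice) for c in range(len(matrice[0])))
--     return min(0, min_riga - max_colonna)
-- ===== Notes on version B (the rewrite author's own statement) =====
-- stated objective: simpler
-- what changed: Replaces the nested r*c scan over all (row,column) pairs by the closed form min(0, min(row_sums) - max(col_sums)), which is equal because row_sum - col_sum is minimised at the smallest row sum and largest column sum.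
import Mathlib
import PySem

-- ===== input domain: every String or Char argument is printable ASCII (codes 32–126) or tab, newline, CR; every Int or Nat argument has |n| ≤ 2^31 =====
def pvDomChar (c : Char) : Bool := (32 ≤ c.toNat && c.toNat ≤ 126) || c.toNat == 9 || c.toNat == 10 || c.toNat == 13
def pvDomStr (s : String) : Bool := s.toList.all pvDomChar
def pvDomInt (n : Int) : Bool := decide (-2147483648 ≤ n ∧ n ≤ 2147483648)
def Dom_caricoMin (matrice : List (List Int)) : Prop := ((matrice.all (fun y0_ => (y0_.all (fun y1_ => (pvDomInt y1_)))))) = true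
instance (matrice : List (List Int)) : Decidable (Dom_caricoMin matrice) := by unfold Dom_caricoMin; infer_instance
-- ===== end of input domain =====

-- B replaces A's nested row×column minimisation loop by the closed form
-- min(0, min(row_sums) - max(col_sums)); equivalence of the return values is proved on Pre_.

-- ===== PORT A =====
def caricoMin (matrice : List (List Int)) : Int :=
  if matrice = [] ∨ matrice.headD [] = [] then 0  -- Python raises ValueError here; excluded by Pre_
  else
    let numeroRighe : Int := (matrice.length : Int)
    let numeroColonne : Int := ((matrice.headD []).length : Int)
    let sommaRighe : List Int := matrice.map (fun riga => riga.sum)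
    let sommeColonne : List Int :=
      (PySem.List.pyRange 0 numeroColonne 1).map (fun c =>
        ((PySem.List.pyRange 0 numeroRighe 1).map
          (fun i => PySem.List.pyGetD (PySem.List.pyGetD matrice i []) c 0)).sum)
    (PySem.List.pyRange 0 numeroRighe 1).foldl (fun cm r =>
      (PySem.List.pyRange 0 numeroColonne 1).foldl (fun cm c =>
        let carico := PySem.List.pyGetD sommaRighe r 0 - PySem.List.pyGetD sommeColonne c 0
        if carico < cm then carico else cm) cm) 0

-- ===== PORT B =====
def caricoMin_alt (matrice : List (List Int)) : Int :=
  if matrice = [] ∨ matrice.headD [] = [] then 0  -- Python raises ValueError here; excluded by Pre_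
  else
    let minRiga : Int :=
      (PySem.List.min? (matrice.map (fun riga => riga.sum)) (fun x => x)).getD 0
    let maxColonna : Int :=
      (PySem.List.max?
        ((PySem.List.pyRange 0 ((matrice.headD []).length : Int) 1).map (fun c =>
          (matrice.map (fun riga => PySem.List.pyGetD riga c 0)).sum)) (fun x => x)).getD 0
    min 0 (minRiga - maxColonna)

-- ===== PRECONDITION & SPEC =====
-- Pre_ excludes exactly the inputs where Python A raises: the empty / empty-first-row matrix
-- (explicit ValueError) and matrices with a row shorter than the first row (IndexError in the
-- column-sum comprehension).
def Pre_caricoMin (matrice : List (List Int)) : Prop :=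
  matrice ≠ [] ∧ matrice.headD [] ≠ [] ∧ ∀ r ∈ matrice, (matrice.headD []).length ≤ r.length
instance (matrice : List (List Int)) : Decidable (Pre_caricoMin matrice) := by
  unfold Pre_caricoMin; infer_instance
def pvWitness_caricoMin : List (List Int) := [[1, 2], [3, 4]]
def Spec_caricoMin (matrice : List (List Int)) (out : Int) : Prop := out = caricoMin_alt matrice
instance (matrice : List (List Int)) (out : Int) : Decidable (Spec_caricoMin matrice out) := by unfold Spec_caricoMin; infer_instance

-- ===== CLAIM (what is proved, stated in full; the proofs are below) =====
def Claim_equal_caricoMin : Prop := ∀ (matrice : List (List Int)), Dom_caricoMin matrice → Pre_caricoMin matrice → Spec_caricoMin matrice (caricoMin matrice)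

-- ===== LEMMAS AND PROOFS =====

-- a running max absorbs a second seed element
theorem pv_foldl_max_init (t : List Int) (x y : Int) :
    t.foldl max (max x y) = max x (t.foldl max y) := by
  induction t generalizing y with
  | nil => rfl
  | cons z t ih =>
    simp only [List.foldl]
    rw [max_assoc, ih]

-- a running min absorbs a second seed element
theorem pv_foldl_min_init (t : List Int) (x y : Int) :
    t.foldl min (min x y) = min x (t.foldl min y) := by
  induction t generalizing y with
  | nil => rfl
  | cons z t ih =>
    simp only [List.foldl]
    rw [min_assoc, ih]

-- A's inner column loop computes min cm (a - max of the column sums)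
theorem pv_inner_fold (a : Int) (b : Int) (t : List Int) (cm : Int) :
    (b :: t).foldl (fun s x => if a - x < s then a - x else s) cm
      = min cm (a - (b :: t).foldl max ((b :: t).headD 0)) := by
  induction t generalizing b cm with
  | nil =>
    simp only [List.foldl, List.headD]
    split_ifs <;> omega
  | cons c t ih =>
    have h1 : ((b :: c :: t).foldl (fun s x => if a - x < s then a - x else s) cm)
        = (c :: t).foldl (fun s x => if a - x < s then a - x else s)
            (if a - b < cm then a - b else cm) := rfl
    rw [h1, ih]
    simp only [List.foldl, List.headD, max_self]
    rw [pv_foldl_max_init]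
    split_ifs <;> omega

-- A's outer row loop computes min cm (min of the row sums - M)
theorem pv_outer_fold (M : Int) (b : Int) (t : List Int) (cm : Int) :
    (b :: t).foldl (fun s x => min s (x - M)) cm
      = min cm ((b :: t).foldl min ((b :: t).headD 0) - M) := by
  induction t generalizing b cm with
  | nil =>
    simp only [List.foldl, List.headD]
    omega
  | cons c t ih =>
    have h1 : ((b :: c :: t).foldl (fun s x => min s (x - M)) cm)
        = (c :: t).foldl (fun s x => min s (x - M)) (min cm (b - M)) := rfl
    rw [h1, ih]
    simp only [List.foldl, List.headD, min_self]
    rw [pv_foldl_min_init]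
    omega

-- ===== VERDICT (by name: the statement is the Claim_ definition above) =====
theorem caricoMin_spec : Claim_equal_caricoMin := by
  intro matrice _hdom hpre
  obtain ⟨hne, hrow, -⟩ := hpre
  unfold Spec_caricoMin caricoMin caricoMin_alt
  have hguard : ¬(matrice = [] ∨ matrice.headD [] = []) := by
    simp only [not_or]; exact ⟨hne, hrow⟩
  rw [if_neg hguard, if_neg hguard]
  obtain ⟨r0, rest, rfl⟩ : ∃ r0 rest, matrice = r0 :: rest := by
    cases matrice with
    | nil => exact absurd rfl hne
    | cons r0 rest => exact ⟨r0, rest, rfl⟩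
  simp only [List.headD] at hrow ⊢
  -- name the two sum lists
  set m : List (List Int) := r0 :: rest with hm
  set srs : List Int := m.map (fun riga => riga.sum) with hsrs
  set colf : Int → Int := fun c => (m.map (fun riga => PySem.List.pyGetD riga c 0)).sum with hcolf
  set nc : Int := (r0.length : Int) with hnc
  -- A's column sums equal B's column sums
  have hcols : ∀ c : Int,
      ((PySem.List.pyRange 0 (m.length : Int) 1).map
        (fun i => PySem.List.pyGetD (PySem.List.pyGetD m i []) c 0)).sum = colf c := by
    intro c
    have := PySem.List.map_pyGetD_pyRange_zero' (xs := m) (d := [])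
    calc ((PySem.List.pyRange 0 (m.length : Int) 1).map
            (fun i => PySem.List.pyGetD (PySem.List.pyGetD m i []) c 0)).sum
        = (((PySem.List.pyRange 0 (m.length : Int) 1).map
            (fun i => PySem.List.pyGetD m i [])).map (fun riga => PySem.List.pyGetD riga c 0)).sum := by
          rw [List.map_map]
          exact rfl
      _ = colf c := by rw [this]
  -- rewrite A's inner loop body so the outer loop has the pyGetD-fold shape
  set scs : List Int := (PySem.List.pyRange 0 nc 1).map colf with hscs
  have hA1 : ((PySem.List.pyRange 0 (m.length : Int) 1).foldl (fun cm r =>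
      (PySem.List.pyRange 0 nc 1).foldl (fun cm c =>
        let carico := PySem.List.pyGetD srs r 0 -
          PySem.List.pyGetD ((PySem.List.pyRange 0 nc 1).map (fun c =>
            ((PySem.List.pyRange 0 (m.length : Int) 1).map
              (fun i => PySem.List.pyGetD (PySem.List.pyGetD m i []) c 0)).sum)) c 0
        if carico < cm then carico else cm) cm) 0)
      = ((PySem.List.pyRange 0 (m.length : Int) 1).foldl (fun cm r =>
      (PySem.List.pyRange 0 nc 1).foldl (fun cm c =>
        if PySem.List.pyGetD srs r 0 - PySem.List.pyGetD scs c 0 < cm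
        then PySem.List.pyGetD srs r 0 - PySem.List.pyGetD scs c 0 else cm) cm) 0) := by
    simp only [hcols]
    rfl
  rw [hA1]
  -- scs is nonempty: nc ≥ 1
  have hnc1 : (0 : Int) < nc := by
    have : 0 < r0.length := List.length_pos_iff.mpr hrow
    omega
  have hscons : PySem.List.pyRange 0 nc 1 = 0 :: PySem.List.pyRange 1 nc 1 :=
    PySem.List.pyRange_one_cons hnc1
  -- convert the inner loop (over column indices) to a fold over scs
  have hlen_scs : (scs.length : Int) = nc := by
    simp [hscs, PySem.List.length_pyRange_one]
    omega
  have hinner : ∀ cm r, ((PySem.List.pyRange 0 nc 1).foldl (fun cm c =>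
        if PySem.List.pyGetD srs r 0 - PySem.List.pyGetD scs c 0 < cm
        then PySem.List.pyGetD srs r 0 - PySem.List.pyGetD scs c 0 else cm) cm)
      = min cm (PySem.List.pyGetD srs r 0 - scs.foldl max (scs.headD 0)) := by
    intro cm r
    rw [← hlen_scs,
      PySem.List.foldl_pyRange_zero_pyGetD' scs 0
        (fun s x => if PySem.List.pyGetD srs r 0 - x < s
                    then PySem.List.pyGetD srs r 0 - x else s) cm]
    obtain ⟨s0, st, hsc⟩ : ∃ s0 st, scs = s0 :: st := by
      cases hs : scs with
      | nil => exfalso; rw [hs] at hlen_scs; simp at hlen_scs; omega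
      | cons s0 st => exact ⟨s0, st, rfl⟩
    rw [hsc]
    exact pv_inner_fold _ s0 st cm
  have hA2 : ((PySem.List.pyRange 0 (m.length : Int) 1).foldl (fun cm r =>
      (PySem.List.pyRange 0 nc 1).foldl (fun cm c =>
        if PySem.List.pyGetD srs r 0 - PySem.List.pyGetD scs c 0 < cm
        then PySem.List.pyGetD srs r 0 - PySem.List.pyGetD scs c 0 else cm) cm) 0)
      = ((PySem.List.pyRange 0 (m.length : Int) 1).foldl (fun cm r =>
          min cm (PySem.List.pyGetD srs r 0 - scs.foldl max (scs.headD 0))) 0) := by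
    congr 1
    funext cm r
    exact hinner cm r
  rw [hA2]
  -- convert the outer loop (over row indices) to a fold over srs
  have hlen_srs : (m.length : Int) = (srs.length : Int) := by simp [hsrs]
  rw [hlen_srs,
    PySem.List.foldl_pyRange_zero_pyGetD' srs 0
      (fun s x => min s (x - scs.foldl max (scs.headD 0))) 0]
  have hsrs_cons : srs = r0.sum :: rest.map (fun riga => riga.sum) := by simp [hsrs, hm]
  rw [hsrs_cons]
  rw [pv_outer_fold (scs.foldl max (scs.headD 0)) r0.sum (rest.map (fun riga => riga.sum)) 0]
  -- identify B's min? / max? with the running folds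
  have hscs_cons : scs = colf 0 :: (PySem.List.pyRange 1 nc 1).map colf := by
    rw [hscs, hscons]; rfl
  rw [hscs_cons, PySem.List.min?_id_cons, PySem.List.max?_id_cons]
  simp only [Option.getD_some, List.headD_cons, List.foldl_cons, min_self, max_self]
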